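-- pv_equiv track=rewrite | github.com/CMU15-112/lecture_demos_qatar | Week2/Lect2/caseChanger.py | caseChanger
-- ===== SOURCE A (Python) =====
-- def caseChanger(s):
--     ret=""
--     case = 0
--
--     for c in s:
--
--         if not c.isalpha(): # if non-alph
--             case = (case+1)%2 # switch case
--
--         elif case == 0: # if case is lower
--             ret+= c.lower() # add lower-case char
--
--         else:# case == 1:
--             ret+= c.upper()
--
--     return ret
-- ===== SOURCE B (Python) =====
-- from itertools import groupby
--
-- def caseChanger(s):
--     ret = ""
--     case = 0
--     for isalpha, grp in groupby(s, key=str.isalpha):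
--         run = ''.join(grp)
--         if isalpha:
--             ret += run.lower() if case == 0 else run.upper()
--         else:
--             case = (case + len(run)) % 2
--     return ret
-- ===== Notes on version B (the rewrite author's own statement) =====
-- stated objective: idiomatic
-- what changed: B replaces A's per-character state machine with itertools.groupby over maximal alpha/non-alpha runs: each alpha run is case-converted and appended as a whole and each non-alpha run advances the case parity by its length in one step (bulk str.lower/upper instead of per-char appends).
import Mathlib
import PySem

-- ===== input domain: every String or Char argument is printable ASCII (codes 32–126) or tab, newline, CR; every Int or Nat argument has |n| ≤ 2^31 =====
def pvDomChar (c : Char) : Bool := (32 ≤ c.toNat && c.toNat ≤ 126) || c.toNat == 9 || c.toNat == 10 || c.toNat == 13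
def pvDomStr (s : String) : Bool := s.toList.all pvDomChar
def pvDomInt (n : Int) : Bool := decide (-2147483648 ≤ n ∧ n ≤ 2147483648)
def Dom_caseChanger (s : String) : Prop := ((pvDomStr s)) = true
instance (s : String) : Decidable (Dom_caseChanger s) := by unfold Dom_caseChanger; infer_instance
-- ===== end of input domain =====

-- B toggles case per maximal alpha/non-alpha run (groupby) instead of per character; idiomatic, same cost.
-- Strings are ported through List Char (PySem.Chars, exact on the ASCII domain).

-- ===== PORT A =====
-- one character at a time: non-alpha flips case, alpha appends the cased char
def pvStepA (st : List Char × Int) (c : Char) : List Char × Int :=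
  if !(PySem.Chars.isalpha c) then (st.1, PySem.Int.mod (st.2 + 1) 2)
  else if st.2 == 0 then (st.1 ++ [PySem.Chars.lowerChar c], st.2)
  else (st.1 ++ [PySem.Chars.upperChar c], st.2)

def caseChanger (s : String) : String :=
  (s.toList.foldl pvStepA ([], 0)).1 |> String.mk

-- ===== PORT B =====
-- itertools.groupby(s, key=str.isalpha): maximal runs tagged with their key
def pvGroups : List Char → List (Bool × List Char)
  | [] => []
  | c :: rest =>
    let k := PySem.Chars.isalpha c
    (k, c :: rest.takeWhile (fun d => PySem.Chars.isalpha d == k)) ::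
      pvGroups (rest.dropWhile (fun d => PySem.Chars.isalpha d == k))
termination_by l => l.length
decreasing_by
  exact Nat.lt_succ_of_le (List.length_dropWhile_le _ _)

-- per run: alpha run appended lower/upper as a whole, non-alpha run advances parity by its length
def pvStepB (st : List Char × Int) (g : Bool × List Char) : List Char × Int :=
  if g.1 then
    (st.1 ++ (if st.2 == 0 then g.2.map PySem.Chars.lowerChar else g.2.map PySem.Chars.upperChar), st.2)
  else (st.1, PySem.Int.mod (st.2 + (g.2.length : Int)) 2)

def caseChanger_alt (s : String) : String :=
  ((pvGroups s.toList).foldl pvStepB ([], 0)).1 |> String.mk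

-- ===== PRECONDITION & SPEC =====
def Spec_caseChanger (s : String) (out : String) : Prop := out = caseChanger_alt s
instance (s : String) (out : String) : Decidable (Spec_caseChanger s out) := by unfold Spec_caseChanger; infer_instance

-- ===== CLAIM (what is proved, stated in full; the proofs are below) =====
def Claim_equal_caseChanger : Prop := ∀ (s : String), Dom_caseChanger s → Spec_caseChanger s (caseChanger s)

-- ===== LEMMAS AND PROOFS =====

theorem pv_mod_emod (x : Int) : PySem.Int.mod x 2 = x % 2 :=
  PySem.Int.mod_eq_emod_of_pos (by omega)

theorem pv_alphaRun (run : List Char) (h : ∀ d ∈ run, PySem.Chars.isalpha d = true)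
    (acc : List Char) (cs : Int) :
    run.foldl pvStepA (acc, cs) =
      (acc ++ (if cs == 0 then run.map PySem.Chars.lowerChar else run.map PySem.Chars.upperChar), cs) := by
  induction run generalizing acc with
  | nil => simp
  | cons d t ih =>
    have hd : PySem.Chars.isalpha d = true := h d (by simp)
    have ht : ∀ e ∈ t, PySem.Chars.isalpha e = true := fun e he => h e (by simp [he])
    rw [List.foldl_cons]
    by_cases hc : cs = 0
    · subst hc
      simp [pvStepA, hd]
      rw [ih ht]
      simp
    · have hc' : (cs == 0) = false := by simpa using hc
      simp [pvStepA, hd, hc']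
      rw [ih ht]
      simp [hc']

theorem pv_nonAlphaRun (run : List Char) (h : ∀ d ∈ run, PySem.Chars.isalpha d = false)
    (acc : List Char) (cs : Int) (hc : cs = 0 ∨ cs = 1) :
    run.foldl pvStepA (acc, cs) = (acc, PySem.Int.mod (cs + (run.length : Int)) 2) := by
  induction run generalizing cs with
  | nil =>
    rw [List.foldl_nil]
    simp only [List.length_nil]
    rw [pv_mod_emod]
    rcases hc with h | h <;> simp [h]
  | cons d t ih =>
    have hd : PySem.Chars.isalpha d = false := h d (by simp)
    have ht : ∀ e ∈ t, PySem.Chars.isalpha e = false := fun e he => h e (by simp [he])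
    rw [List.foldl_cons]
    simp [pvStepA, hd]
    rw [ih ht ((cs + 1) % 2) (by omega), pv_mod_emod]
    simp only [Prod.mk.injEq, true_and]
    omega

theorem pv_main (n : Nat) (l : List Char) (hl : l.length ≤ n) (acc : List Char) (cs : Int)
    (hc : cs = 0 ∨ cs = 1) :
    l.foldl pvStepA (acc, cs) = (pvGroups l).foldl pvStepB (acc, cs) := by
  induction n generalizing l acc cs with
  | zero =>
    have : l = [] := List.eq_nil_of_length_eq_zero (Nat.le_zero.mp hl)
    simp [this, pvGroups]
  | succ n ih =>
    match l with
    | [] => simp [pvGroups]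
    | c :: rest =>
      rw [pvGroups]
      set k := PySem.Chars.isalpha c with hk
      set run := rest.takeWhile (fun d => PySem.Chars.isalpha d == k) with hrun
      set rest' := rest.dropWhile (fun d => PySem.Chars.isalpha d == k) with hrest'
      have hsplit : rest = run ++ rest' := (List.takeWhile_append_dropWhile ..).symm
      have hrlen : rest'.length ≤ n := by
        have h1 : rest'.length ≤ rest.length := List.length_dropWhile_le _ _
        have h2 : rest.length ≤ n := by simpa using Nat.le_of_succ_le_succ hl
        omega
      have hrunP : ∀ d ∈ run, PySem.Chars.isalpha d = k := by
        intro d hd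
        have := List.mem_takeWhile_imp (hrun ▸ hd)
        simpa using this
      have hstep : (c :: rest) = (c :: run) ++ rest' := by simp [hsplit]
      rw [hstep, List.foldl_append]
      cases hkv : k with
      | true =>
        have hall : ∀ d ∈ (c :: run), PySem.Chars.isalpha d = true := by
          intro d hd
          rcases List.mem_cons.mp hd with h | h
          · simpa [h, hk] using hkv
          · rw [hrunP d h]; exact hkv
        rw [pv_alphaRun (c :: run) hall acc cs]
        rw [List.foldl_cons]
        simp only [pvStepB, if_true]
        exact ih rest' hrlen _ cs hc
      | false =>
        have hall : ∀ d ∈ (c :: run), PySem.Chars.isalpha d = false := by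
          intro d hd
          rcases List.mem_cons.mp hd with h | h
          · simpa [h, hk] using hkv
          · rw [hrunP d h]; exact hkv
        rw [pv_nonAlphaRun (c :: run) hall acc cs hc]
        rw [List.foldl_cons]
        simp only [pvStepB, if_false, Bool.false_eq_true]
        exact ih rest' hrlen _ _ (PySem.Int.mod_two_eq _)

-- ===== VERDICT (by name: the statement is the Claim_ definition above) =====
theorem caseChanger_spec : Claim_equal_caseChanger := by
  intro s _
  unfold Spec_caseChanger caseChanger caseChanger_alt
  rw [pv_main s.toList.length s.toList le_rfl [] 0 (Or.inl rfl)]
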